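-- pv_equiv track=rewrite | github.com/Darkdragon14/ha-guest-mode | custom_components/ha_guest_mode/lovelace_visibility.py | _group_selections
-- ===== SOURCE A (Python) =====
-- from collections.abc import Iterable
-- from typing import Any, cast
--
-- def _normalize_selection(selection: str) -> tuple[str, str | None] | None:
--     if not selection:
--         return None
--     sanitized = selection.strip()
--     if not sanitized:
--         return None
--     sanitized = sanitized.strip("/")
--     if not sanitized:
--         return None
--     if "/" in sanitized:
--         dashboard, view = sanitized.split("/", 1)
--         dashboard = (dashboard or "lovelace").strip() or "lovelace"
--         view = (view or "").strip().strip("/") or None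
--         return (dashboard, view)
--     return sanitized, None
--
-- def _group_selections(selections: Iterable[str]) -> dict[str, set[str] | None]:
--     grouped: dict[str, set[str] | None] = {}
--     for raw in selections:
--         normalized = _normalize_selection(raw)
--         if not normalized:
--             continue
--         dashboard, view = normalized
--         if view is None:
--             grouped[dashboard] = None
--             continue
--         if dashboard in grouped and grouped[dashboard] is None:
--             continue
--         if dashboard not in grouped:
--             grouped[dashboard] = {view}
--             continue
--         cast(set[str], grouped[dashboard]).add(view)
--     return grouped
-- ===== SOURCE B (Python) =====
-- def _normalize_selection(selection):
--     if not selection: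
--         return None
--     sanitized = selection.strip()
--     if not sanitized:
--         return None
--     sanitized = sanitized.strip("/")
--     if not sanitized:
--         return None
--     if "/" in sanitized:
--         dashboard, view = sanitized.split("/", 1)
--         dashboard = (dashboard or "lovelace").strip() or "lovelace"
--         view = (view or "").strip().strip("/") or None
--         return (dashboard, view)
--     return sanitized, None
--
-- def _group_selections(selections):
--     # normalize everything once, then build each dashboard's value by scanning the pairs:
--     # a dashboard is None iff it has any bare selection, else the set of all its views.
--     pairs = [p for p in map(_normalize_selection, selections) if p]
--     full = {d for d, v in pairs if v is None}
--     result = {}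
--     for d, _ in pairs:
--         if d not in result:
--             result[d] = None if d in full else {v for d2, v in pairs if d2 == d and v is not None}
--     return result
-- ===== Notes on version B (the rewrite author's own statement) =====
-- stated objective: alternative
-- what changed: Replaces A's single-pass dict of mutable sets with sticky-None updates by a staged computation: normalize all selections into a pairs list once, compute the set of 'full' dashboards, then for each first-occurrence dashboard build its value with a nested scan over the pairs (None wins); no incremental set mutation remains.
import Mathlib
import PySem

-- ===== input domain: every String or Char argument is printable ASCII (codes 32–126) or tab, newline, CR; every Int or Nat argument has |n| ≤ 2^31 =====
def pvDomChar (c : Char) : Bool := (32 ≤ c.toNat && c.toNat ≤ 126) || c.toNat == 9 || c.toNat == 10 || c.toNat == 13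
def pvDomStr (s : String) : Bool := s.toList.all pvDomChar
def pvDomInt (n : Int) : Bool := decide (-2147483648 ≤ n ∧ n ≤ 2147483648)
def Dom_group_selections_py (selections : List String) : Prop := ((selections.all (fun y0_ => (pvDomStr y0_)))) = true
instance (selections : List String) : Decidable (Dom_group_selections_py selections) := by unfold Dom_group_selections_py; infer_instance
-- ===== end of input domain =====

-- B replaces A's single-pass sticky-None dict accumulation by staged passes: normalize once, then a nested scan builds each dashboard's value (objective: alternative).


-- ===== PORT A =====
-- shared helper: _normalize_selection (identical in Source A and Source B)
def normalize_selection (selection : String) : Option (String × Option String) :=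
  if selection = "" then none
  else
    let sanitized := PySem.Str.strip selection
    if sanitized = "" then none
    else
      let sanitized := PySem.Str.stripChars sanitized "/"
      if sanitized = "" then none
      else if PySem.Str.isIn "/" sanitized then
        -- dashboard, view = sanitized.split("/", 1)  (always exactly two pieces here)
        let parts := (PySem.Str.splitMax? sanitized "/" 1).getD []
        let dashboard := parts.getD 0 ""
        let view := parts.getD 1 ""
        let dashboard := PySem.Str.strip (if dashboard = "" then "lovelace" else dashboard)
        let dashboard := if dashboard = "" then "lovelace" else dashboard
        let view := PySem.Str.stripChars (PySem.Str.strip view) "/"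
        some (dashboard, if view = "" then none else some view)
      else some (sanitized, none)

def group_selections_py (selections : List String) : List (String × Option (List String)) :=
  (selections.foldl (fun (grouped : PySem.Dict String (Option (PySem.Set String))) raw =>
      match normalize_selection raw with
      | none => grouped
      | some (dashboard, view) =>
        match view with
        | none => grouped.insert dashboard none
        | some v =>
          match grouped.get? dashboard with
          | some none => grouped
          | none => grouped.insert dashboard (some (PySem.Set.add PySem.Set.empty v))
          | some (some s) => grouped.insert dashboard (some (PySem.Set.add s v)))
    PySem.Dict.empty).items

-- ===== PORT B =====
def group_selections_py_alt (selections : List String) : List (String × Option (List String)) :=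
  -- pairs = [p for p in map(_normalize_selection, selections) if p]
  let pairs := selections.filterMap normalize_selection
  -- full = {d for d, v in pairs if v is None}
  let full := PySem.Set.ofList (pairs.filterMap (fun p => if p.2 = none then some p.1 else none))
  -- for d, _ in pairs: if d not in result: result[d] = None if d in full else {v for d2, v in pairs if d2 == d and v is not None}
  (pairs.foldl (fun (result : PySem.Dict String (Option (PySem.Set String))) p =>
      if result.contains p.1 then result
      else result.insert p.1
        (if PySem.Set.contains full p.1 then none
         else some (PySem.Set.ofList (pairs.filterMap (fun q => if q.1 = p.1 then q.2 else none)))))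
    PySem.Dict.empty).items

-- ===== PRECONDITION & SPEC =====
def Spec_group_selections_py (selections : List String) (out : List (String × Option (List String))) : Prop := out = group_selections_py_alt selections
instance (selections : List String) (out : List (String × Option (List String))) : Decidable (Spec_group_selections_py selections out) := by unfold Spec_group_selections_py; infer_instance

-- ===== CLAIM =====
def Claim_equal_group_selections_py : Prop := ∀ (selections : List String), Dom_group_selections_py selections → Spec_group_selections_py selections (group_selections_py selections)

-- ===== LEMMAS AND PROOFS =====

-- A's loop body, over an already-normalized pair
def stepAPair (grouped : PySem.Dict String (Option (PySem.Set String))) (p : String × Option String) :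
    PySem.Dict String (Option (PySem.Set String)) :=
  match p with
  | (dashboard, view) =>
    match view with
    | none => grouped.insert dashboard none
    | some v =>
      match grouped.get? dashboard with
      | some none => grouped
      | none => grouped.insert dashboard (some (PySem.Set.add PySem.Set.empty v))
      | some (some s) => grouped.insert dashboard (some (PySem.Set.add s v))

-- the views of dashboard d among the normalized pairs, in order
def viewsOf (ps : List (String × Option String)) (d : String) : List String :=
  ps.filterMap (fun q => if q.1 = d then q.2 else none)

-- the final value A/B associate with dashboard d, given the full pairs list
def valOf (ps : List (String × Option String)) (d : String) : Option (PySem.Set String) :=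
  if (d, (none : Option String)) ∈ ps then none
  else some (PySem.Set.ofList (viewsOf ps d))

-- the characterized result: keys in first-occurrence order, each with its final value
def charOf (ps : List (String × Option String)) : PySem.Dict String (Option (PySem.Set String)) :=
  PySem.Dict.mk ((PySem.Set.ofList (ps.map Prod.fst)).map (fun d => (d, valOf ps d)))

theorem foldA_filterMap (l : List String) (D : PySem.Dict String (Option (PySem.Set String))) :
    l.foldl (fun (grouped : PySem.Dict String (Option (PySem.Set String))) raw =>
      match normalize_selection raw with
      | none => grouped
      | some (dashboard, view) =>
        match view with
        | none => grouped.insert dashboard none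
        | some v =>
          match grouped.get? dashboard with
          | some none => grouped
          | none => grouped.insert dashboard (some (PySem.Set.add PySem.Set.empty v))
          | some (some s) => grouped.insert dashboard (some (PySem.Set.add s v))) D
      = (l.filterMap normalize_selection).foldl stepAPair D := by
  induction l generalizing D with
  | nil => rfl
  | cons a t ih =>
    rw [List.foldl_cons, List.filterMap_cons]
    cases h : normalize_selection a with
    | none => exact ih D
    | some p =>
      obtain ⟨d, view⟩ := p
      cases view <;> exact ih _

theorem get?_mk_map (S : List String) (g : String → Option (PySem.Set String)) (k : String) :
    (PySem.Dict.mk (S.map (fun d => (d, g d)))).get? k = if k ∈ S then some (g k) else none := by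
  induction S with
  | nil => rfl
  | cons d t ih =>
    by_cases h : d = k
    · subst h; simp [PySem.Dict.get?_mk_cons]
    · simp [PySem.Dict.get?_mk_cons, h, ih, Ne.symm h]

theorem contains_mk_map (S : List String) (g : String → Option (PySem.Set String)) (k : String) :
    (PySem.Dict.mk (S.map (fun d => (d, g d)))).contains k = decide (k ∈ S) := by
  rw [PySem.Dict.contains_eq_isSome_get?, get?_mk_map]
  by_cases h : k ∈ S <;> simp [h]

theorem viewsOf_of_not_mem_fst (ps : List (String × Option String)) (d : String)
    (h : d ∉ ps.map Prod.fst) : viewsOf ps d = [] := by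
  induction ps with
  | nil => rfl
  | cons q t ih =>
    simp only [List.map_cons, List.mem_cons, not_or] at h
    simp only [viewsOf, List.filterMap_cons]
    rw [if_neg (fun h' => h.1 h'.symm)]
    exact ih h.2

theorem viewsOf_append_singleton_of_ne (ps : List (String × Option String))
    (q : String × Option String) (d : String) (h : q.1 ≠ d) :
    viewsOf (ps ++ [q]) d = viewsOf ps d := by
  simp only [viewsOf, List.filterMap_append, List.filterMap_cons]
  rw [if_neg h]
  simp

theorem valOf_append_of_ne (ps : List (String × Option String))
    (q : String × Option String) (d : String) (h : q.1 ≠ d) :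
    valOf (ps ++ [q]) d = valOf ps d := by
  have hm : ((d, (none : Option String)) ∈ ps ++ [q]) ↔ (d, (none : Option String)) ∈ ps := by
    simp only [List.mem_append, List.mem_singleton]
    constructor
    · rintro (hp | hp)
      · exact hp
      · exact absurd (congrArg Prod.fst hp).symm h
    · exact Or.inl
  simp only [valOf, viewsOf_append_singleton_of_ne ps q d h]
  by_cases hp : (d, (none : Option String)) ∈ ps
  · rw [if_pos hp, if_pos (hm.mpr hp)]
  · rw [if_neg hp, if_neg (fun hx => hp (hm.mp hx))]

-- the characterization of A's fold, by reverse induction on the pairs list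
theorem charA (ps : List (String × Option String)) :
    ps.foldl stepAPair PySem.Dict.empty = charOf ps := by
  induction ps using List.reverseRecOn with
  | nil => rfl
  | append_singleton ps p ih =>
    rw [List.foldl_append, List.foldl_cons, List.foldl_nil, ih]
    obtain ⟨d, view⟩ := p
    cases view with
    | none =>
      show (charOf ps).insert d none = charOf (ps ++ [(d, none)])
      by_cases hc : d ∈ ps.map Prod.fst
      · have hcS : d ∈ PySem.Set.ofList (ps.map Prod.fst) := (PySem.Set.mem_ofList _ _).mpr hc
        apply PySem.Dict.ext
        rw [PySem.Dict.items_insert_of_contains _ _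
          (by simp only [charOf, contains_mk_map, decide_eq_true_eq, PySem.Set.mem_ofList]; exact hc)]
        simp only [charOf, List.map_append, List.map_cons, List.map_nil,
          PySem.Set.ofList_append_singleton, PySem.Set.add_of_mem hcS, List.map_map]
        apply List.map_congr_left
        intro e he
        by_cases hed : e = d
        · subst hed; simp [valOf]
        · have : ((e, valOf ps e).1 == d) = false := by simpa using hed
          simp only [Function.comp_apply, this, Bool.false_eq_true, if_false]
          rw [valOf_append_of_ne ps (d, none) e (fun h => hed h.symm)]
      · have hcS : d ∉ PySem.Set.ofList (ps.map Prod.fst) :=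
          fun h => hc ((PySem.Set.mem_ofList _ _).mp h)
        apply PySem.Dict.ext
        rw [PySem.Dict.items_insert_of_not_contains _ _
          (by simp only [charOf, contains_mk_map, decide_eq_false_iff_not, PySem.Set.mem_ofList]; exact hc)]
        simp only [charOf, List.map_append, List.map_cons, List.map_nil,
          PySem.Set.ofList_append_singleton, PySem.Set.add_of_not_mem hcS]
        congr 1
        · apply List.map_congr_left
          intro e he
          have hed : e ≠ d := fun h => hcS (h ▸ he)
          rw [valOf_append_of_ne ps (d, none) e (fun h => hed h.symm)]
        · simp [valOf]
    | some v =>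
      show stepAPair (charOf ps) (d, some v) = charOf (ps ++ [(d, some v)])
      by_cases hc : d ∈ ps.map Prod.fst
      · have hcS : d ∈ PySem.Set.ofList (ps.map Prod.fst) := (PySem.Set.mem_ofList _ _).mpr hc
        by_cases hf : (d, (none : Option String)) ∈ ps
        · -- grouped[d] is None: A skips, and the characterization is unchanged
          have hg : (charOf ps).get? d = some none := by
            simp [charOf, get?_mk_map, PySem.Set.mem_ofList, hc, valOf, hf]
          simp only [stepAPair, hg]
          apply PySem.Dict.ext
          simp only [charOf, List.map_append, List.map_cons, List.map_nil,
            PySem.Set.ofList_append_singleton, PySem.Set.add_of_mem hcS]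
          apply List.map_congr_left
          intro e he
          by_cases hed : e = d
          · subst hed; simp [valOf, hf]
          · rw [valOf_append_of_ne ps (d, some v) e (fun h => hed h.symm)]
        · -- add v to the existing set
          have hg : (charOf ps).get? d = some (some (PySem.Set.ofList (viewsOf ps d))) := by
            simp [charOf, get?_mk_map, PySem.Set.mem_ofList, hc, valOf, hf]
          simp only [stepAPair, hg]
          apply PySem.Dict.ext
          rw [PySem.Dict.items_insert_of_contains _ _
            (by simp only [charOf, contains_mk_map, decide_eq_true_eq, PySem.Set.mem_ofList]; exact hc)]
          simp only [charOf, List.map_append, List.map_cons, List.map_nil,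
          PySem.Set.ofList_append_singleton, PySem.Set.add_of_mem hcS, List.map_map]
          apply List.map_congr_left
          intro e he
          by_cases hed : e = d
          · subst hed
            have hfn : ((e, (none : Option String)) ∈ ps ++ [(e, some v)]) ↔ False := by
              simp [hf]
            simp only [Function.comp_apply, beq_self_eq_true, if_true, valOf, hfn, if_false,
              viewsOf, List.filterMap_append, List.filterMap_cons]
            simp [PySem.Set.ofList_append_singleton]
          · have : ((e, valOf ps e).1 == d) = false := by simpa using hed
            simp only [Function.comp_apply, this, Bool.false_eq_true, if_false]
            rw [valOf_append_of_ne ps (d, some v) e (fun h => hed h.symm)]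
      · -- new dashboard with a view
        have hcS : d ∉ PySem.Set.ofList (ps.map Prod.fst) :=
          fun h => hc ((PySem.Set.mem_ofList _ _).mp h)
        have hg : (charOf ps).get? d = none := by
          simp [charOf, get?_mk_map, PySem.Set.mem_ofList, hc]
        simp only [stepAPair, hg]
        apply PySem.Dict.ext
        rw [PySem.Dict.items_insert_of_not_contains _ _
          (by simp only [charOf, contains_mk_map, decide_eq_false_iff_not, PySem.Set.mem_ofList]; exact hc)]
        simp only [charOf, List.map_append, List.map_cons, List.map_nil,
          PySem.Set.ofList_append_singleton, PySem.Set.add_of_not_mem hcS]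
        have hnf : (d, (none : Option String)) ∉ ps := fun h =>
          hc (by simpa using List.mem_map_of_mem (f := Prod.fst) h)
        congr 1
        · apply List.map_congr_left
          intro e he
          have hed : e ≠ d := fun h => hcS (h ▸ he)
          rw [valOf_append_of_ne ps (d, some v) e (fun h => hed h.symm)]
        · have hfn : ((d, (none : Option String)) ∈ ps ++ [(d, some v)]) ↔ False := by
            simp [hnf]
          simp only [valOf, hfn, if_false, viewsOf, List.filterMap_append, List.filterMap_cons]
          have : List.filterMap (fun q => if q.1 = d then q.2 else none) ps = [] :=
            viewsOf_of_not_mem_fst ps d hc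
          simp [this]
          rfl

-- the characterization of B's guarded-insert fold
theorem charB (g : String → Option (PySem.Set String)) (ps : List (String × Option String))
    (S : List String) :
    ps.foldl (fun D p => if D.contains p.1 then D else D.insert p.1 (g p.1))
        (PySem.Dict.mk (S.map (fun d => (d, g d))))
      = PySem.Dict.mk ((PySem.Set.update S (ps.map Prod.fst)).map (fun d => (d, g d))) := by
  induction ps generalizing S with
  | nil => rfl
  | cons p t ih =>
    rw [List.foldl_cons, List.map_cons, PySem.Set.update_cons]
    by_cases hc : p.1 ∈ S
    · rw [contains_mk_map]
      simp only [hc, decide_true, if_true, PySem.Set.add_of_mem hc]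
      exact ih S
    · rw [contains_mk_map]
      simp only [hc, decide_false, Bool.false_eq_true, if_false, PySem.Set.add_of_not_mem hc]
      have hins : (PySem.Dict.mk (S.map (fun d => (d, g d)))).insert p.1 (g p.1)
          = PySem.Dict.mk ((S ++ [p.1]).map (fun d => (d, g d))) := by
        apply PySem.Dict.ext
        rw [PySem.Dict.items_insert_of_not_contains _ _ (by rw [contains_mk_map]; simpa using hc)]
        simp
      rw [hins]
      exact ih (S ++ [p.1])

-- ===== VERDICT =====
theorem group_selections_py_spec : Claim_equal_group_selections_py := by
  intro sels _
  unfold Spec_group_selections_py group_selections_py group_selections_py_alt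
  rw [foldA_filterMap]
  set ps := sels.filterMap normalize_selection with hps
  rw [charA ps]
  have hfull : ∀ d : String,
      PySem.Set.contains (PySem.Set.ofList (ps.filterMap (fun p => if p.2 = none then some p.1 else none))) d
        = decide ((d, (none : Option String)) ∈ ps) := by
    intro d
    rw [PySem.Set.contains_eq_decide]
    simp only [PySem.Set.mem_ofList, List.mem_filterMap]
    congr 1
    apply propext
    constructor
    · rintro ⟨p, hp, h⟩
      by_cases h2 : p.2 = none
      · simp only [h2] at h
        obtain ⟨p1, p2⟩ := p
        simp only at h2
        subst h2
        cases h
        exact hp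
      · simp [h2] at h
    · intro h; exact ⟨(d, none), h, rfl⟩
  have hg : ∀ d : String, (if PySem.Set.contains (PySem.Set.ofList (ps.filterMap (fun p => if p.2 = none then some p.1 else none))) d then (none : Option (PySem.Set String))
        else some (PySem.Set.ofList (ps.filterMap (fun q => if q.1 = d then q.2 else none))))
      = valOf ps d := by
    intro d
    rw [hfull d]
    by_cases h : (d, (none : Option String)) ∈ ps <;> simp [h, valOf, viewsOf]
  show (charOf ps).items = _
  have hempty : (PySem.Dict.empty : PySem.Dict String (Option (PySem.Set String)))
      = PySem.Dict.mk (([] : List String).map (fun d => (d, valOf ps d))) := rfl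
  simp only [hg, hempty]
  rw [charB (valOf ps) ps []]
  simp [charOf, PySem.Set.update_nil_left]
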